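-- pv_equiv track=rewrite | github.com/alex7186/weather_bot | back/text_converter.py | shift_center
-- ===== SOURCE A (Python) =====
-- def shift_center(
--     input_text: str,
--     line_length: int = 14,
--     base_margin_left: int = 9,
--     skip_left: int = 0,
-- ) -> str:
--
--     text = input_text.strip()
--
--     line_clean = text[:]
--     while "{" in line_clean:
--         bracket_index = line_clean.index("{")
--         line_clean = line_clean[:bracket_index] + line_clean[bracket_index + 5 :]
--         line_clean = line_clean.replace("}", "@")
--
--     margin = (line_length + 1 - len(line_clean)) // 2
--     margin = margin if margin > 0 else 0
--
--     res = (" " * skip_left + "{:>" + f"{margin + len(text)}" + "}").format(text)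
--     res += " " * (line_length - len(res))
--
--     return res
-- ===== SOURCE B (Python) =====
-- def shift_center(
--     input_text: str,
--     line_length: int = 14,
--     base_margin_left: int = 9,
--     skip_left: int = 0,
-- ) -> str:
--     text = input_text.strip()
--
--     # one left-to-right pass: count characters that survive the brace stripping
--     clean_len = 0
--     skip = 0
--     for ch in text:
--         if skip > 0:
--             skip -= 1
--         elif ch == "{":
--             skip = 4
--         else:
--             clean_len += 1
--
--     margin = max((line_length + 1 - clean_len) // 2, 0)
--     out = " " * skip_left + " " * margin + text
--     return out + " " * max(line_length - len(out), 0)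
-- ===== Notes on version B (the rewrite author's own statement) =====
-- stated objective: simpler
-- what changed: Replaces the repeated find-index/slice/replace while-loop over the string with a single left-to-right pass that counts the characters surviving the brace stripping (only the cleaned LENGTH is ever used), and builds the centered line directly as spaces+text instead of going through a dynamically built format string.
import Mathlib
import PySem

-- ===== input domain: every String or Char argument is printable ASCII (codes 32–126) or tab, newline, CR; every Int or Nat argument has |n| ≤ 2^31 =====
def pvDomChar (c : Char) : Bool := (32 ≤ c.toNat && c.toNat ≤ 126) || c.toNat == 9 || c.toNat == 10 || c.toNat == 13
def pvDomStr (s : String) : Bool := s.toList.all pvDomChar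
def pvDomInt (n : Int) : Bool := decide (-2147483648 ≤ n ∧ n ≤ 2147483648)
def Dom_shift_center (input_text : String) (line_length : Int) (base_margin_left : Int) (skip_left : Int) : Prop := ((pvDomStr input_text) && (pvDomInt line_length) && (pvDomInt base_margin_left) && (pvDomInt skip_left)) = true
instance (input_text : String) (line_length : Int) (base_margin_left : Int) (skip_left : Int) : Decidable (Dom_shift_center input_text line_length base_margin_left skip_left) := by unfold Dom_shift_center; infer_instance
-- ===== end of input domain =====

-- B strips brace tokens in one counting pass instead of A's repeated index/slice/replace loop,
-- and builds the line as spaces+text directly instead of via a dynamically built format string (objective: simpler).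

-- ===== PORT A =====
-- str.replace("}", "@") with single-character arguments is exactly a character-wise map
def pvRepl (c : Char) : Char := if c = '}' then '@' else c

-- the `while "{" in line_clean` loop; for a single-char needle, `"{" in s` is char membership,
-- `.index("{")` (present by the guard) is List.idxOf, and the slices s[:i] / s[i+5:] with
-- 0 ≤ i < len(s) are exactly List.take i / List.drop (i+5)
def pvALoop (s : List Char) : List Char :=
  if h : '{' ∈ s then
    pvALoop ((s.take (s.idxOf '{') ++ s.drop (s.idxOf '{' + 5)).map pvRepl)
  else s
termination_by s.length
decreasing_by
  have hi : s.idxOf '{' < s.length := List.idxOf_lt_length_of_mem h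
  simp [List.length_take, List.length_drop]
  omega

-- "{:>w}".format(text): right-align `text` with spaces to width w (no padding if w ≤ len(text))
def pvFormatRight (w : Int) (s : List Char) : List Char :=
  List.replicate (w - s.length).toNat ' ' ++ s

def shift_center (input_text : String) (line_length : Int) (base_margin_left : Int) (skip_left : Int) : String :=
  let text := (PySem.Str.strip input_text).toList
  let line_clean := pvALoop text
  let margin := PySem.Int.floordiv (line_length + 1 - (line_clean.length : Int)) 2
  let margin := if margin > 0 then margin else 0
  -- " " * skip_left (empty for skip_left ≤ 0, as Int.toNat clamps) ++ the formatted text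
  let res := List.replicate skip_left.toNat ' ' ++ pvFormatRight (margin + (text.length : Int)) text
  let res := res ++ List.replicate (line_length - (res.length : Int)).toNat ' '
  String.mk res

-- ===== PORT B =====
-- the single pass of Source B: state = (clean_len, skip)
def pvStep (st : Int × Int) (c : Char) : Int × Int :=
  if st.2 > 0 then (st.1, st.2 - 1)
  else if c = '{' then (st.1, 4)
  else (st.1 + 1, st.2)

def shift_center_alt (input_text : String) (line_length : Int) (base_margin_left : Int) (skip_left : Int) : String :=
  let text := (PySem.Str.strip input_text).toList
  let clean_len := (text.foldl pvStep (0, 0)).1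
  let margin := max (PySem.Int.floordiv (line_length + 1 - clean_len) 2) 0
  let out := List.replicate skip_left.toNat ' ' ++ List.replicate margin.toNat ' ' ++ text
  String.mk (out ++ List.replicate (max (line_length - (out.length : Int)) 0).toNat ' ')

-- ===== PRECONDITION & SPEC =====
def Spec_shift_center (input_text : String) (line_length : Int) (base_margin_left : Int) (skip_left : Int) (out : String) : Prop := out = shift_center_alt input_text line_length base_margin_left skip_left
instance (input_text : String) (line_length : Int) (base_margin_left : Int) (skip_left : Int) (out : String) : Decidable (Spec_shift_center input_text line_length base_margin_left skip_left out) := by unfold Spec_shift_center; infer_instance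

-- ===== CLAIM (what is proved, stated in full; the proofs are below) =====
def Claim_equal_shift_center : Prop := ∀ (input_text : String) (line_length : Int) (base_margin_left : Int) (skip_left : Int), Dom_shift_center input_text line_length base_margin_left skip_left → Spec_shift_center input_text line_length base_margin_left skip_left (shift_center input_text line_length base_margin_left skip_left)

-- ===== LEMMAS AND PROOFS =====

-- reference count: length after stripping '{'-tokens while `k` chars are still to be skipped
def pvM : Nat → List Char → Nat
  | _, [] => 0
  | k + 1, _ :: t => pvM k t
  | 0, c :: t => if c = '{' then pvM 4 t else pvM 0 t + 1

theorem pvRepl_brace_iff (c : Char) : pvRepl c = '{' ↔ c = '{' := by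
  unfold pvRepl
  split_ifs with h
  · subst h; simp
  · exact Iff.rfl

theorem pvM_drop (k : Nat) (s : List Char) : pvM k s = pvM 0 (s.drop k) := by
  induction k generalizing s with
  | zero => simp
  | succ k ih => cases s with
    | nil => simp [pvM]
    | cons c t => simpa [pvM] using ih t

theorem pvM_map_repl (k : Nat) (s : List Char) : pvM k (s.map pvRepl) = pvM k s := by
  induction s generalizing k with
  | nil => simp
  | cons c t ih =>
    cases k with
    | succ k => simpa [pvM] using ih k
    | zero =>
      simp only [List.map_cons, pvM]
      by_cases h : c = '{'
      · rw [if_pos h, if_pos ((pvRepl_brace_iff c).2 h), ih]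
      · rw [if_neg h, if_neg (fun hh => h ((pvRepl_brace_iff c).1 hh)), ih]

theorem pvM_no_brace (s : List Char) (h : '{' ∉ s) : pvM 0 s = s.length := by
  induction s with
  | nil => simp [pvM]
  | cons c t ih =>
    simp at h
    simp only [pvM, List.length_cons]
    rw [if_neg (fun hh => h.1 hh.symm), ih h.2]

theorem pvM_append_no_brace (p t : List Char) (h : '{' ∉ p) :
    pvM 0 (p ++ t) = p.length + pvM 0 t := by
  induction p with
  | nil => simp
  | cons c q ih =>
    simp at h
    simp only [List.cons_append, pvM, List.length_cons]
    rw [if_neg (fun hh => h.1 hh.symm), ih h.2]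
    omega

theorem pvNotMemTakeIdx (l : List Char) : '{' ∉ l.take (l.idxOf '{') := by
  intro hm
  have hl : '{' ∈ l := List.mem_of_mem_take hm
  exact absurd ((List.mem_take_iff_idxOf_lt hl).1 hm) (lt_irrefl _)

theorem pvALoop_length (s : List Char) : (pvALoop s).length = pvM 0 s := by
  induction s using pvALoop.induct with
  | case1 s h ih =>
    rw [pvALoop, dif_pos h]
    have hi : s.idxOf '{' < s.length := List.idxOf_lt_length_of_mem h
    have hget : s[s.idxOf '{']'hi = '{' := List.getElem_idxOf hi
    rw [ih, pvM_map_repl, pvM_append_no_brace _ _ (pvNotMemTakeIdx s)]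
    conv_rhs => rw [← List.take_append_drop (s.idxOf '{') s]
    rw [pvM_append_no_brace _ _ (pvNotMemTakeIdx s)]
    rw [List.drop_eq_getElem_cons hi, hget]
    rw [show pvM 0 ('{' :: s.drop (s.idxOf '{' + 1)) = pvM 4 (s.drop (s.idxOf '{' + 1)) from by
      simp [pvM]]
    rw [pvM_drop 4, List.drop_drop]
  | case2 s h =>
    rw [pvALoop, dif_neg h]
    exact (pvM_no_brace s h).symm

theorem pvFold_count (s : List Char) (a : Int) (k : Nat) :
    (s.foldl pvStep (a, (k : Int))).1 = a + (pvM k s : Int) := by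
  induction s generalizing a k with
  | nil => simp
  | cons c t ih =>
    cases k with
    | succ k =>
      have hst : pvStep (a, ((k + 1 : Nat) : Int)) c = (a, (k : Int)) := by
        simp only [pvStep]
        rw [if_pos (by push_cast; omega)]
        push_cast
        norm_num
      rw [List.foldl_cons, hst, ih]
      rfl
    | zero =>
      by_cases hc : c = '{'
      · have hst : pvStep (a, ((0 : Nat) : Int)) c = (a, ((4 : Nat) : Int)) := by
          simp [pvStep, hc]
        rw [List.foldl_cons, hst, ih]
        simp [pvM, hc]
      · have hst : pvStep (a, ((0 : Nat) : Int)) c = (a + 1, ((0 : Nat) : Int)) := by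
          simp [pvStep, hc]
        rw [List.foldl_cons, hst, ih]
        simp only [pvM, if_neg hc]
        push_cast
        ring

-- ===== VERDICT (by name: the statement is the Claim_ definition above) =====
theorem shift_center_spec : Claim_equal_shift_center := by
  intro input_text line_length base_margin_left skip_left _
  unfold Spec_shift_center shift_center shift_center_alt
  simp only []
  set text := (PySem.Str.strip input_text).toList with htext
  have hlen : ((text.foldl pvStep (0, 0)).1 : Int) = ((pvALoop text).length : Int) := by
    rw [show ((0 : Int), (0 : Int)) = ((0 : Int), ((0 : Nat) : Int)) from by norm_num]
    rw [pvFold_count, pvALoop_length]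
    simp
  rw [hlen]
  set m := PySem.Int.floordiv (line_length + 1 - ((pvALoop text).length : Int)) 2 with hm
  have hmax : (if m > 0 then m else 0) = max m 0 := by
    split_ifs with h <;> omega
  rw [hmax]
  have hfmt : pvFormatRight (max m 0 + (text.length : Int)) text
      = List.replicate (max m 0).toNat ' ' ++ text := by
    unfold pvFormatRight
    congr 2
    omega
  rw [hfmt, ← List.append_assoc]
  have hpad : (line_length - ((List.replicate skip_left.toNat ' ' ++ List.replicate (max m 0).toNat ' ' ++ text : List Char).length : Int)).toNat = (max (line_length - ((List.replicate skip_left.toNat ' ' ++ List.replicate (max m 0).toNat ' ' ++ text : List Char).length : Int)) 0).toNat := by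
    omega
  rw [List.append_assoc]
  rw [hpad]
  simp only [List.append_assoc]
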